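-- pv_equiv track=rewrite | github.com/som1sezhi/itg-difficulty-predictor | analysis/hash.py | _minimize_chart
-- ===== SOURCE A (Python) =====
-- def _minimize_measure(measure):
--     if not measure:
--         # if the measure is empty, it will cause an infinite loop in
--         # the while loop after this, so we have to catch it now
--         # TODO: figure out a more proper way of dealing with empty measures
--         raise RuntimeError('chart contains an empty measure')
--     minimal = False
--     while not minimal and len(measure) % 2 == 0:
--         all_zeroes = True
--         for row in measure[1::2]:
--             if row != '0' * len(row):
--                 all_zeroes = False
--                 break
--         if all_zeroes:
--             measure = measure[::2]
--         else:
--             minimal = True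
--     return measure
--
-- def _minimize_chart(chart_str):
--     final_data = []
--     cur_measure = []
--     for line in chart_str.split('\n'):
--         if line == ',':
--             cur_measure = _minimize_measure(cur_measure)
--             final_data.extend(cur_measure)
--             final_data.append(',')
--             cur_measure.clear()
--         else:
--             cur_measure.append(line)
--     if cur_measure:
--         cur_measure = _minimize_measure(cur_measure)
--         final_data.extend(cur_measure)
--     return '\n'.join(final_data)
-- ===== SOURCE B (Python) =====
-- def _v2(i):
--     # 2-adic valuation: number of trailing factors of 2 (callers pass i >= 1)
--     k = 0
--     while i % 2 == 0:
--         i //= 2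
--         k += 1
--     return k
--
-- def _minimize_measure(measure):
--     if not measure:
--         raise RuntimeError('chart contains an empty measure')
--     # final reduction factor 2**k: k is capped by v2(len) and by the
--     # 2-adic valuation of every index holding a non-empty (non-all-'0') row
--     k = _v2(len(measure))
--     for i, row in enumerate(measure):
--         if i > 0 and row != '0' * len(row):
--             k = min(k, _v2(i))
--     return measure[::2 ** k]
--
-- def _minimize_chart(chart_str):
--     out = []
--     measure = []
--     for line in chart_str.split('\n'):
--         if line != ',':
--             measure.append(line)
--         else:
--             out += _minimize_measure(measure) + [',']
--             measure = []
--     if measure: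
--         out += _minimize_measure(measure)
--     return '\n'.join(out)
-- ===== Notes on version B (the rewrite author's own statement) =====
-- stated objective: alternative
-- what changed: _minimize_measure no longer halves the list repeatedly while rescanning the odd rows: one enumerate pass computes the reduction exponent k = min(v2(len(measure)), v2(i) over indices i>0 of non-all-zero rows) and a single extended slice measure[::2**k] is taken.
import Mathlib
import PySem

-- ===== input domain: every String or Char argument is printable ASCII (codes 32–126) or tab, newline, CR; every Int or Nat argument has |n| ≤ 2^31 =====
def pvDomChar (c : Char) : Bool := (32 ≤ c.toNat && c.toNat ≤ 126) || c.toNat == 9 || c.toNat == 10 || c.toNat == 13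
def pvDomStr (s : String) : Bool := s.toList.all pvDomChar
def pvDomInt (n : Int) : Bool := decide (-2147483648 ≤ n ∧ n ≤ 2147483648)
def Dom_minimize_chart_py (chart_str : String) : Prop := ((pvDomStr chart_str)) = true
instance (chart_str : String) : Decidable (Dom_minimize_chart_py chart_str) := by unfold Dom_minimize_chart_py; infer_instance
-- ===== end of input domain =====

-- B replaces A's repeated halve-and-rescan while-loop by one enumerate pass that computes the
-- reduction exponent k = min(v2(len), v2 of every non-zero row index) and slices once (objective: alternative).

-- ===== PORT A =====

-- `row != '0' * len(row)` (string repetition on code points = List.replicate)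
def pvRowNonzero (row : String) : Bool := row.toList != List.replicate row.toList.length '0'

-- proof-side view of a positive-step slice xs[::s]; the port's termination argument cites
-- pvSlice_two_length below, so these live above the ports
def pvRow (m : List String) (i : Nat) : String := m.getD i ""
def pvCnt (n s : Nat) : Nat := (n + s - 1) / s
def pvStride (m : List String) (s : Nat) : List String :=
  (List.range (pvCnt m.length s)).map (fun k => pvRow m (s * k))

theorem pvLtCnt {s : Nat} (hs : 0 < s) (n k : Nat) : k < pvCnt n s ↔ s * k < n := by
  unfold pvCnt
  rw [Nat.lt_div_iff_mul_lt hs]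
  have : k * s = s * k := Nat.mul_comm k s
  omega

theorem pvSlice_stride (m : List String) (s : Nat) (hs : 0 < s) :
    PySem.List.slice? m none none ((s : Nat) : Int) = some (pvStride m s) := by
  have hns : ¬ ((s : Int) < 0) := by exact_mod_cast Int.not_lt.mpr (Int.natCast_nonneg s)
  have hps : (0 : Int) < (s : Int) := by exact_mod_cast hs
  have hsne : ¬ ((s : Int) = 0) := by exact_mod_cast Nat.pos_iff_ne_zero.mp hs
  simp only [PySem.List.slice?, PySem.List.sliceIndices, if_neg hns, if_pos hps]
  rw [if_neg hsne]
  have hc : (if (0:Int) < (m.length:Int) then (((m.length:Int) - 0 + s - 1) / s).toNat else 0) = pvCnt m.length s := by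
    split_ifs with h
    · unfold pvCnt
      have he : ((m.length:Int) - 0 + s - 1) = ((m.length + s - 1 : Nat) : Int) := by omega
      rw [he, ← Int.natCast_div, Int.toNat_natCast]
    · unfold pvCnt
      have h0 : m.length = 0 := by omega
      rw [h0, Nat.div_eq_of_lt (by omega)]
  rw [hc]
  congr 1
  unfold pvStride
  rw [List.filterMap_congr (g := fun k => some (pvRow m (s * k)))]
  · exact congrFun List.filterMap_eq_map _
  · intro k hk
    rw [List.mem_range, pvLtCnt hs] at hk
    have hidx : ((0 : Int) + (s : Int) * (k : Int)).toNat = s * k := by omega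
    rw [hidx, List.getElem?_eq_getElem hk]
    unfold pvRow
    rw [List.getD_eq_getElem m _ hk]

theorem pvSlice_two_length (m : List String) :
    ((PySem.List.slice? m none none 2).getD []).length = pvCnt m.length 2 := by
  have h := pvSlice_stride m 2 (by norm_num)
  norm_num at h
  simp [h, pvStride]

-- the `while not minimal and len(measure) % 2 == 0` loop of _minimize_measure;
-- `m ≠ []` is a totality guard only: Python reaches the loop after the empty-measure check
def pvLoopA (m : List String) : List String :=
  if m.length % 2 = 0 ∧ m ≠ [] then
    if ((PySem.List.slice? m (some 1) none 2).getD []).all (fun row => !pvRowNonzero row) then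
      pvLoopA ((PySem.List.slice? m none none 2).getD [])   -- measure = measure[::2]
    else m                                                  -- minimal = True
  else m
termination_by m.length
decreasing_by
  rename_i h _
  rw [pvSlice_two_length m]
  unfold pvCnt
  have : m.length ≠ 0 := by simpa using List.length_eq_zero_iff.not.mpr h.2
  omega

-- _minimize_measure; on [] Python raises RuntimeError (excluded by Pre_), we return []
def pvMinMeasureA (measure : List String) : List String :=
  if measure = [] then [] else pvLoopA measure

def minimize_chart_py (chart_str : String) : String :=
  let r := ((PySem.Str.split? chart_str "\n").getD []).foldl
    (fun (acc : List String × List String) line =>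
      if line = "," then (acc.1 ++ pvMinMeasureA acc.2 ++ [","], [])
      else (acc.1, acc.2 ++ [line])) ([], [])
  PySem.Str.join "\n" (if r.2 ≠ [] then r.1 ++ pvMinMeasureA r.2 else r.1)

-- ===== PORT B =====

-- _v2; the `n ≠ 0` conjunct is a totality guard only (callers pass n ≥ 1)
def pvV2 (n : Nat) : Nat :=
  if h : n % 2 = 0 ∧ n ≠ 0 then pvV2 (n / 2) + 1 else 0
termination_by n
decreasing_by exact Nat.div_lt_self (Nat.pos_of_ne_zero h.2) (by norm_num)

-- _minimize_measure of B; on [] Python raises RuntimeError (excluded by Pre_), we return []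
def pvMinMeasureB (measure : List String) : List String :=
  if measure = [] then []
  else
    let k := (PySem.List.enumerate measure).foldl
      (fun k p => if 0 < p.1 && pvRowNonzero p.2 then min k (pvV2 p.1.toNat) else k)
      (pvV2 measure.length)
    (PySem.List.slice? measure none none ((2 ^ k : Nat) : Int)).getD []   -- measure[::2**k]

def minimize_chart_py_alt (chart_str : String) : String :=
  let r := ((PySem.Str.split? chart_str "\n").getD []).foldl
    (fun (acc : List String × List String) line =>
      if line ≠ "," then (acc.1, acc.2 ++ [line])
      else (acc.1 ++ (pvMinMeasureB acc.2 ++ [","]), [])) ([], [])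
  PySem.Str.join "\n" (if r.2 ≠ [] then r.1 ++ pvMinMeasureB r.2 else r.1)

-- ===== PRECONDITION & SPEC =====
-- Pre_ excludes exactly the charts on which Python's _minimize_measure raises RuntimeError:
-- a comma line that is first or immediately follows another comma line (an empty measure).
def Pre_minimize_chart_py (chart_str : String) : Prop :=
  ((PySem.Str.split? chart_str "\n").getD []).head? ≠ some "," ∧
  List.IsChain (fun a b => ¬(a = "," ∧ b = ",")) ((PySem.Str.split? chart_str "\n").getD [])
instance (chart_str : String) : Decidable (Pre_minimize_chart_py chart_str) := by
  unfold Pre_minimize_chart_py; infer_instance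

def pvWitness_minimize_chart_py : String := "1000\n0000\n,\n0011"

def Spec_minimize_chart_py (chart_str : String) (out : String) : Prop := out = minimize_chart_py_alt chart_str
instance (chart_str : String) (out : String) : Decidable (Spec_minimize_chart_py chart_str out) := by unfold Spec_minimize_chart_py; infer_instance

-- ===== CLAIM (what is proved, stated in full; the proofs are below) =====
def Claim_equal_minimize_chart_py : Prop := ∀ (chart_str : String), Dom_minimize_chart_py chart_str → Pre_minimize_chart_py chart_str → Spec_minimize_chart_py chart_str (minimize_chart_py chart_str)

-- ===== LEMMAS AND PROOFS =====

theorem pvStride_length (m : List String) (s : Nat) : (pvStride m s).length = pvCnt m.length s := by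
  simp [pvStride]

theorem pvStride_getD (m : List String) {s : Nat} (_hs : 0 < s) {k : Nat} (hk : k < pvCnt m.length s) :
    pvRow (pvStride m s) k = pvRow m (s * k) := by
  unfold pvStride pvRow
  rw [List.getD_eq_getElem _ _ (by simpa [pvStride] using hk)]
  simp

theorem pvStride_one (m : List String) : pvStride m 1 = m := by
  apply List.ext_getElem
  · simp [pvStride, pvCnt]
  · intro i h1 h2
    simp [pvStride, pvCnt, pvRow] at h1 ⊢
    simp [List.getElem?_eq_getElem h2]

theorem pvCnt_comp (n s : Nat) (hs : 0 < s) : pvCnt (pvCnt n 2) s = pvCnt n (2 * s) := by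
  have hiff : ∀ k, (k < pvCnt (pvCnt n 2) s ↔ k < pvCnt n (2 * s)) := by
    intro k
    rw [pvLtCnt hs, pvLtCnt (by omega : 0 < 2), pvLtCnt (by omega : 0 < 2 * s)]
    rw [Nat.mul_assoc]
  have h1 := hiff (pvCnt (pvCnt n 2) s)
  have h2 := hiff (pvCnt n (2 * s))
  omega

theorem pvStride_comp (m : List String) (s : Nat) (hs : 0 < s) :
    pvStride (pvStride m 2) s = pvStride m (2 * s) := by
  apply List.ext_getElem
  · simp only [pvStride_length]
    exact pvCnt_comp m.length s hs
  · intro i h1 h2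
    rw [← List.getD_eq_getElem _ "" h1, ← List.getD_eq_getElem _ "" h2]
    show pvRow _ i = pvRow _ i
    simp only [pvStride_length] at h1 h2
    rw [pvStride_getD _ hs (by rw [pvStride_length]; exact h1)]
    rw [pvStride_getD _ (by omega : (0:Nat) < 2) (by rwa [pvLtCnt hs] at h1)]
    rw [pvStride_getD _ (by omega : 0 < 2 * s) h2]
    rw [Nat.mul_assoc]

-- the fold of port B as a min over the valuations of the non-zero row indices
def pvP (m : List String) (i : Nat) : Bool := decide (0 < i) && pvRowNonzero (pvRow m i)
def pvV (m : List String) : List Nat :=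
  (List.range m.length).filterMap (fun i => if pvP m i then some (pvV2 i) else none)
def pvK (m : List String) : Nat := (pvV m).foldl min (pvV2 m.length)

theorem pvFoldFilter (l : List Nat) (p : Nat → Bool) (f : Nat → Nat) (a : Nat) :
    l.foldl (fun acc i => if p i then min acc (f i) else acc) a
      = (l.filterMap (fun i => if p i then some (f i) else none)).foldl min a := by
  induction l generalizing a with
  | nil => rfl
  | cons x t ih =>
    by_cases h : p x = true <;> simp [h, ih]

theorem pvFold_eq (m : List String) (a : Nat) :
    (PySem.List.enumerate m).foldl
      (fun k p => if 0 < p.1 && pvRowNonzero p.2 then min k (pvV2 p.1.toNat) else k) a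
    = (pvV m).foldl min a := by
  rw [show PySem.List.enumerate m = List.map (fun j => (j, PySem.List.pyGetD m j ""))
        (PySem.List.pyRange 0 (PySem.List.len m)) from PySem.List.enumerate_eq_map_pyRange m ""]
  rw [List.foldl_map, PySem.List.pyRange_one]
  rw [List.foldl_map]
  unfold pvV
  have hlen : (PySem.List.len m - 0).toNat = m.length := by simp [pysem]
  rw [hlen]
  rw [PySem.List.foldl_congr_mem _ _ (fun acc i => if pvP m i then min acc (pvV2 i) else acc) a ?_]
  · exact pvFoldFilter (List.range m.length) (pvP m) pvV2 a
  · intro acc x hx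
    simp [pvP, pvRow, PySem.List.pyGetD_natCast]

theorem pvFoldMin_le_init (l : List Nat) (a : Nat) : l.foldl min a ≤ a := by
  induction l generalizing a with
  | nil => simp
  | cons x t ih => exact le_trans (ih (min a x)) (Nat.min_le_left a x)

theorem pvFoldMin_le_mem (l : List Nat) (a x : Nat) (hx : x ∈ l) : l.foldl min a ≤ x := by
  induction l generalizing a with
  | nil => simp at hx
  | cons y t ih =>
    rcases List.mem_cons.mp hx with h | h
    · subst h
      exact le_trans (pvFoldMin_le_init t (min a x)) (Nat.min_le_right a x)
    · exact ih (min a y) h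

theorem pvFoldMin_map_succ (l : List Nat) (a : Nat) :
    (l.map (· + 1)).foldl min (a + 1) = l.foldl min a + 1 := by
  induction l generalizing a with
  | nil => rfl
  | cons x t ih => simp [Nat.succ_min_succ, ih]

theorem pvV2_odd {n : Nat} (h : n % 2 = 1) : pvV2 n = 0 := by
  unfold pvV2
  rw [dif_neg (by omega)]

theorem pvV2_two_mul {c : Nat} (h : 0 < c) : pvV2 (2 * c) = pvV2 c + 1 := by
  rw [pvV2, dif_pos ⟨by omega, by omega⟩]
  have : 2 * c / 2 = c := by omega
  rw [this]

theorem pvV_aux (m : List String) (c : Nat)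
    (hz : ∀ j < c, pvRowNonzero (pvRow m (2 * j + 1)) = false) :
    (List.range (2 * c)).filterMap (fun i => if pvP m i then some (pvV2 i) else none)
      = ((List.range c).filterMap
          (fun j => if decide (0 < j) && pvRowNonzero (pvRow m (2 * j)) then some (pvV2 j) else none)).map (· + 1) := by
  induction c with
  | zero => rfl
  | succ c ih =>
    have h1 : 2 * (c + 1) = (2 * c + 1) + 1 := by omega
    rw [h1, List.range_succ, List.range_succ, List.range_succ]
    rw [List.filterMap_append, List.filterMap_append, List.filterMap_append, List.map_append]
    rw [ih (fun j hj => hz j (by omega)), List.append_assoc]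
    congr 1
    have hodd : pvP m (2 * c + 1) = false := by
      simp [pvP, hz c (by omega)]
    simp only [List.filterMap_cons, List.filterMap_nil, hodd]
    by_cases hc : 0 < c
    · have hp : pvP m (2 * c) = (decide (0 < c) && pvRowNonzero (pvRow m (2 * c))) := by
        simp only [pvP]
        congr 1
        simp only [decide_eq_decide]
        omega
      rw [hp]
      by_cases hnz : pvRowNonzero (pvRow m (2 * c)) = true
      · simp [hnz, hc, pvV2_two_mul hc]
      · simp only [Bool.not_eq_true] at hnz
        simp [hnz]
    · have hc0 : c = 0 := by omega
      subst hc0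
      simp [pvP]

theorem pvV_evens (m : List String) (he : m.length % 2 = 0)
    (hz : ∀ j < m.length / 2, pvRowNonzero (pvRow m (2 * j + 1)) = false) :
    pvV m = (pvV (pvStride m 2)).map (· + 1) := by
  have hc2 : pvCnt m.length 2 = m.length / 2 := by unfold pvCnt; omega
  have hstr : pvV (pvStride m 2)
      = (List.range (m.length / 2)).filterMap
          (fun j => if decide (0 < j) && pvRowNonzero (pvRow m (2 * j)) then some (pvV2 j) else none) := by
    unfold pvV
    rw [pvStride_length, hc2]
    apply List.filterMap_congr
    intro j hj
    rw [List.mem_range] at hj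
    have hp : pvP (pvStride m 2) j = (decide (0 < j) && pvRowNonzero (pvRow m (2 * j))) := by
      unfold pvP
      rw [pvStride_getD m (by omega) (by rw [hc2]; omega)]
    rw [hp]
  rw [hstr]
  have h2c : m.length = 2 * (m.length / 2) := by omega
  unfold pvV
  rw [show List.range m.length = List.range (2 * (m.length / 2)) from by rw [← h2c]]
  exact pvV_aux m (m.length / 2) hz

theorem pvV_zero_mem (m : List String) (j : Nat) (hj : 2 * j + 1 < m.length)
    (hnz : pvRowNonzero (pvRow m (2 * j + 1)) = true) : (0 : Nat) ∈ pvV m := by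
  unfold pvV
  apply List.mem_filterMap.mpr
  refine ⟨2 * j + 1, List.mem_range.mpr hj, ?_⟩
  rw [if_pos (by simp [pvP, hnz]), pvV2_odd (by omega)]

-- the all-zero test of port A on the odd-index rows
def pvOdds (m : List String) : List String :=
  (List.range (m.length / 2)).map (fun k => pvRow m (2 * k + 1))

theorem pvSlice_odds (m : List String) :
    PySem.List.slice? m (some 1) none 2 = some (pvOdds m) := by
  simp only [PySem.List.slice?, PySem.List.sliceIndices]
  norm_num
  rcases Nat.eq_zero_or_pos m.length with h0 | hpos
  · simp [h0, pvOdds]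
  · have h1 : ((1:Int) ≤ (m.length:Int)) := by exact_mod_cast hpos
    rw [min_eq_left h1]
    have hc : (if 1 < m.length then (((m.length:Int) - 1 + 2 - 1) / 2).toNat else 0) = m.length / 2 := by
      split_ifs with h
      · have he : ((m.length:Int) - 1 + 2 - 1) = ((m.length : Nat) : Int) := by omega
        rw [he]
        omega
      · have h1' : m.length = 1 := by omega
        rw [h1']
    rw [hc]
    unfold pvOdds
    rw [List.filterMap_congr (g := fun k => some (pvRow m (2 * k + 1)))]
    · exact congrFun List.filterMap_eq_map _
    · intro k hk
      rw [List.mem_range] at hk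
      have hlt : 2 * k + 1 < m.length := by omega
      have hidx : ((1 : Int) + 2 * (k : Int)).toNat = 2 * k + 1 := by omega
      rw [hidx, List.getElem?_eq_getElem hlt]
      unfold pvRow
      rw [List.getD_eq_getElem m _ hlt]

theorem pvOdds_all (m : List String) :
    (pvOdds m).all (fun row => !pvRowNonzero row) = true
      ↔ ∀ j < m.length / 2, pvRowNonzero (pvRow m (2 * j + 1)) = false := by
  rw [List.all_eq_true]
  constructor
  · intro h j hj
    have := h (pvRow m (2 * j + 1)) (by
      unfold pvOdds
      exact List.mem_map.mpr ⟨j, List.mem_range.mpr hj, rfl⟩)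
    simpa using this
  · intro h row hrow
    unfold pvOdds at hrow
    rcases List.mem_map.mp hrow with ⟨j, hj, rfl⟩
    rw [List.mem_range] at hj
    simp [h j hj]

-- the heart: A's halving loop computes exactly the single slice of B
theorem pvCore : ∀ (n : Nat) (m : List String), m.length = n → m ≠ [] →
    pvLoopA m = pvStride m (2 ^ pvK m) := by
  intro n
  induction n using Nat.strong_induction_on with
  | _ n ih =>
    intro m hlen hne
    have hn0 : 0 < m.length := List.length_pos_iff.mpr hne
    rcases Nat.even_or_odd m.length with he | ho
    · -- even length
      have he2 : m.length % 2 = 0 := Nat.even_iff.mp he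
      rw [pvLoopA, if_pos ⟨he2, hne⟩, pvSlice_odds, Option.getD_some]
      by_cases hall : (pvOdds m).all (fun row => !pvRowNonzero row) = true
      · -- all odd rows zero: loop recurses on the even-index rows
        rw [hall, if_pos rfl]
        have hz := (pvOdds_all m).mp hall
        have hbr := pvSlice_stride m 2 (by norm_num)
        norm_num at hbr
        rw [hbr, Option.getD_some]
        have hlen2 : (pvStride m 2).length = pvCnt m.length 2 := pvStride_length m 2
        have hclt : pvCnt m.length 2 < n := by
          rw [← hlen]
          unfold pvCnt
          omega
        have hne2 : pvStride m 2 ≠ [] := by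
          have hl : (pvStride m 2).length ≠ 0 := by
            rw [hlen2]
            unfold pvCnt
            omega
          exact fun hc => hl (by rw [hc]; rfl)
        rw [ih (pvCnt m.length 2) hclt (pvStride m 2) hlen2 hne2]
        have hv2 : pvV2 m.length = pvV2 (pvCnt m.length 2) + 1 := by
          have h2c : m.length = 2 * (pvCnt m.length 2) := by unfold pvCnt; omega
          conv_lhs => rw [h2c]
          rw [pvV2_two_mul (by unfold pvCnt; omega)]
        have hKeq : pvK m = pvK (pvStride m 2) + 1 := by
          unfold pvK
          rw [pvV_evens m he2 hz, hlen2, hv2]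
          exact pvFoldMin_map_succ (pvV (pvStride m 2)) (pvV2 (pvCnt m.length 2))
        rw [hKeq, pvStride_comp m _ (by positivity)]
        congr 1
        rw [pow_succ]
        omega
      · -- some odd row non-zero: loop stops; the exponent is 0
        rw [if_neg (by simpa using hall)]
        have hK0 : pvK m = 0 := by
          rcases (by simpa [List.all_eq_true] using hall :
            ∃ row ∈ pvOdds m, pvRowNonzero row = true) with ⟨row, hrow, hnz⟩
          unfold pvOdds at hrow
          rcases List.mem_map.mp hrow with ⟨j, hj, rfl⟩
          rw [List.mem_range] at hj
          have hmem := pvV_zero_mem m j (by omega) hnz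
          have hle := pvFoldMin_le_mem (pvV m) (pvV2 m.length) 0 hmem
          unfold pvK
          omega
        rw [hK0, pow_zero, pvStride_one]
    · -- odd length: loop does not run
      have ho2 : m.length % 2 = 1 := Nat.odd_iff.mp ho
      rw [pvLoopA, if_neg (by omega : ¬ (m.length % 2 = 0 ∧ m ≠ []))]
      have hK0 : pvK m = 0 := by
        have hle := pvFoldMin_le_init (pvV m) (pvV2 m.length)
        unfold pvK
        rw [pvV2_odd ho2] at hle ⊢
        omega
      rw [hK0, pow_zero, pvStride_one]

theorem pvMinMeasure_eq (m : List String) : pvMinMeasureA m = pvMinMeasureB m := by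
  unfold pvMinMeasureA pvMinMeasureB
  by_cases hm : m = []
  · simp [hm]
  · rw [if_neg hm, if_neg hm]
    simp only [pvFold_eq m (pvV2 m.length)]
    rw [pvSlice_stride m (2 ^ ((pvV m).foldl min (pvV2 m.length))) (by positivity), Option.getD_some]
    exact pvCore m.length m rfl hm

theorem pvChart_eq (s : String) : minimize_chart_py s = minimize_chart_py_alt s := by
  unfold minimize_chart_py minimize_chart_py_alt
  have hstep : (fun (acc : List String × List String) line =>
      if line = "," then (acc.1 ++ pvMinMeasureA acc.2 ++ [","], ([] : List String))
      else (acc.1, acc.2 ++ [line]))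
      = (fun (acc : List String × List String) line =>
      if line ≠ "," then (acc.1, acc.2 ++ [line])
      else (acc.1 ++ (pvMinMeasureB acc.2 ++ [","]), [])) := by
    funext acc line
    by_cases h : line = "," <;> simp [h, pvMinMeasure_eq, List.append_assoc]
  rw [hstep]
  simp only [pvMinMeasure_eq]

-- ===== VERDICT (by name: the statement is the Claim_ definition above) =====
theorem minimize_chart_py_spec : Claim_equal_minimize_chart_py := by
  intro s _ _
  unfold Spec_minimize_chart_py
  exact pvChart_eq s
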